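-- pv_equiv track=rewrite | github.com/marcoleto01/KnowledgeGraphsProject | Backend/KnowledgeGraphsProject/graphBuilder.py | clean_property_key
-- ===== SOURCE A (Python) =====
-- def clean_property_key(key):
--
--     # Special character mappings
--     char_map = {
--         '/': '_per_',
--         '\\': '_backslash_',
--         '.': '_dot_',
--         '-': '_dash_',
--         '=': '_equals_',
--         '@': '_at_',
--         '#': '_hash_',
--         '^': '_caret_',
--         '&': '_and_',
--         '*': '_star_',
--         '(': '_leftparen_',
--         ')': '_rightparen_',
--         '[': '_leftbracket_',
--         ']': '_rightbracket_',
--         '{': '_leftbrace_',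
--         '}': '_rightbrace_',
--         '|': '_pipe_',
--         '?': '_question_',
--         '!': '_exclamation_',
--         '<': '_less_',
--         '>': '_greater_',
--         ',': '_comma_',
--         ':': '_colon_',
--         ';': '_semicolon_',
--         '`': '_backtick_',
--         '~': '_tilde_',
--         "'": '_quote_',
--         '"': '_doublequote_',
--     }
--
--     result = key
--     for char, replacement in char_map.items():
--         result = result.replace(char, replacement)
--
--     # Ensure the key starts with a letter (Neo4j requirement)
--     if result and not result[0].isalpha():
--         result = 'prop_' + result
--
--     return result
-- ===== SOURCE B (Python) =====
-- def clean_property_key(key):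
--     # no dict: a conditional-chain escaper, applied in one explicit pass with an accumulator
--     def esc(c):
--         if c == '/': return '_per_'
--         if c == '\\': return '_backslash_'
--         if c == '.': return '_dot_'
--         if c == '-': return '_dash_'
--         if c == '=': return '_equals_'
--         if c == '@': return '_at_'
--         if c == '#': return '_hash_'
--         if c == '^': return '_caret_'
--         if c == '&': return '_and_'
--         if c == '*': return '_star_'
--         if c == '(': return '_leftparen_'
--         if c == ')': return '_rightparen_'
--         if c == '[': return '_leftbracket_'
--         if c == ']': return '_rightbracket_'
--         if c == '{': return '_leftbrace_'
--         if c == '}': return '_rightbrace_'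
--         if c == '|': return '_pipe_'
--         if c == '?': return '_question_'
--         if c == '!': return '_exclamation_'
--         if c == '<': return '_less_'
--         if c == '>': return '_greater_'
--         if c == ',': return '_comma_'
--         if c == ':': return '_colon_'
--         if c == ';': return '_semicolon_'
--         if c == '`': return '_backtick_'
--         if c == '~': return '_tilde_'
--         if c == "'": return '_quote_'
--         if c == '"': return '_doublequote_'
--         return c
--
--     parts = []
--     for c in key:
--         parts.append(esc(c))
--     result = ''.join(parts)
--
--     # Ensure the key starts with a letter (Neo4j requirement)
--     head = result[:1]
--     if head and not head.isalpha():
--         result = 'prop_' + result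
--     return result
-- ===== Notes on version B (the rewrite author's own statement) =====
-- stated objective: alternative
-- what changed: Drops the dict and the 28 sequential whole-string str.replace passes: a conditional-chain escaper is applied once per character in a single explicit accumulator loop, then joined; the first-letter guard is unchanged in effect.
import Mathlib
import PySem

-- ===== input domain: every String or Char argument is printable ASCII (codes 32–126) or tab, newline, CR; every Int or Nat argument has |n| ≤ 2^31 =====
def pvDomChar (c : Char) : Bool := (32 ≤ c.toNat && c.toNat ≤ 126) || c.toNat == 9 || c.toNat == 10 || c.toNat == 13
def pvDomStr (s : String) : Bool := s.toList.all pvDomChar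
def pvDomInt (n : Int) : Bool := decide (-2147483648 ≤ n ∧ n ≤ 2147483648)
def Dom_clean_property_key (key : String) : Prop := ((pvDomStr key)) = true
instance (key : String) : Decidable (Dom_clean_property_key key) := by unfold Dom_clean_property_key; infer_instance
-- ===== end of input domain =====

-- B drops the dict and the 28 sequential whole-string replace passes: a conditional-chain
-- escaper applied once per character in one explicit accumulator loop; objective: alternative.

-- ===== PORT A =====
-- char_map.items() ported as the literal association list in insertion order
def pvCharMapA : List (String × String) := [
  ("/", "_per_"),
  ("\\", "_backslash_"),
  (".", "_dot_"),
  ("-", "_dash_"),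
  ("=", "_equals_"),
  ("@", "_at_"),
  ("#", "_hash_"),
  ("^", "_caret_"),
  ("&", "_and_"),
  ("*", "_star_"),
  ("(", "_leftparen_"),
  (")", "_rightparen_"),
  ("[", "_leftbracket_"),
  ("]", "_rightbracket_"),
  ("{", "_leftbrace_"),
  ("}", "_rightbrace_"),
  ("|", "_pipe_"),
  ("?", "_question_"),
  ("!", "_exclamation_"),
  ("<", "_less_"),
  (">", "_greater_"),
  (",", "_comma_"),
  (":", "_colon_"),
  (";", "_semicolon_"),
  ("`", "_backtick_"),
  ("~", "_tilde_"),
  ("'", "_quote_"),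
  ("\"", "_doublequote_")
]

def clean_property_key (key : String) : String :=
  -- result = key; for char, replacement in char_map.items(): result = result.replace(char, replacement)
  let result := pvCharMapA.foldl (fun r p => PySem.Str.replace r p.1 p.2) key
  -- if result and not result[0].isalpha(): result = 'prop_' + result
  match result.toList with
  | [] => result
  | c :: _ => if !(PySem.Chars.isalpha c) then "prop_" ++ result else result

-- ===== PORT B =====
-- the `esc` conditional chain of Source B (no dict)
def pvEsc (c : Char) : String :=
  if c = '/' then "_per_"
  else if c = '\\' then "_backslash_"
  else if c = '.' then "_dot_"
  else if c = '-' then "_dash_"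
  else if c = '=' then "_equals_"
  else if c = '@' then "_at_"
  else if c = '#' then "_hash_"
  else if c = '^' then "_caret_"
  else if c = '&' then "_and_"
  else if c = '*' then "_star_"
  else if c = '(' then "_leftparen_"
  else if c = ')' then "_rightparen_"
  else if c = '[' then "_leftbracket_"
  else if c = ']' then "_rightbracket_"
  else if c = '{' then "_leftbrace_"
  else if c = '}' then "_rightbrace_"
  else if c = '|' then "_pipe_"
  else if c = '?' then "_question_"
  else if c = '!' then "_exclamation_"
  else if c = '<' then "_less_"
  else if c = '>' then "_greater_"
  else if c = ',' then "_comma_"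
  else if c = ':' then "_colon_"
  else if c = ';' then "_semicolon_"
  else if c = '`' then "_backtick_"
  else if c = '~' then "_tilde_"
  else if c = '\'' then "_quote_"
  else if c = '"' then "_doublequote_"
  else String.ofList [c]

-- parts = []; for c in key: parts.append(esc(c))
def pvEscLoop : List Char → List String → List String
  | [], parts => parts
  | c :: rest, parts => pvEscLoop rest (parts ++ [pvEsc c])

def clean_property_key_alt (key : String) : String :=
  let parts := pvEscLoop key.toList []
  -- result = ''.join(parts)
  let result := PySem.Str.join "" parts
  -- head = result[:1]; if head and not head.isalpha(): result = 'prop_' + result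
  let head := PySem.Str.slice result none (some 1)
  if head ≠ "" ∧ PySem.Str.strIsalpha head = false then "prop_" ++ result else result

-- ===== PRECONDITION & SPEC =====
def Spec_clean_property_key (key : String) (out : String) : Prop := out = clean_property_key_alt key
instance (key : String) (out : String) : Decidable (Spec_clean_property_key key out) := by unfold Spec_clean_property_key; infer_instance

-- ===== CLAIM (what is proved, stated in full; the proofs are below) =====
def Claim_equal_clean_property_key : Prop := ∀ (key : String), Dom_clean_property_key key → Spec_clean_property_key key (clean_property_key key)

-- ===== LEMMAS AND PROOFS =====

-- single-character substitution: what s.replace(c, r) does to each character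
def pvSubst (p : Char) (r : List Char) (c : Char) : List Char := if c = p then r else [c]

lemma pv_go_single (p : Char) (new : List Char) :
    ∀ (l acc : List Char) (fuel : Nat), l.length ≤ fuel →
    PySem.Chars.replace.go [p] new fuel l acc = acc.reverse ++ l.flatMap (pvSubst p new) := by
  intro l
  induction l with
  | nil =>
    intro acc fuel _
    cases fuel <;> simp [PySem.Chars.replace.go]
  | cons c t ih =>
    intro acc fuel hf
    cases fuel with
    | zero => simp at hf
    | succ f =>
      simp only [List.length_cons, Nat.succ_le_succ_iff] at hf
      by_cases hc : p = c
      · subst hc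
        have hpre : List.isPrefixOf [p] (p :: t) = true := by
          simp [List.isPrefixOf]
        simp only [PySem.Chars.replace.go, hpre, if_true, List.length_cons,
          List.length_nil, List.drop_succ_cons, List.drop_zero]
        rw [ih _ f hf]
        simp [pvSubst]
      · have hpre : List.isPrefixOf [p] (c :: t) = false := by
          simp [List.isPrefixOf]; exact hc
        simp only [PySem.Chars.replace.go, hpre, Bool.false_eq_true, if_false]
        rw [ih _ f hf]
        have hcp : ¬ c = p := fun h => hc h.symm
        simp [pvSubst, hcp]

lemma pv_replace_single (s : List Char) (p : Char) (new : List Char) :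
    PySem.Chars.replace s [p] new = s.flatMap (pvSubst p new) := by
  simp [PySem.Chars.replace, pv_go_single p new s [] s.length (le_refl _)]

-- A's 28 replace passes compute, character for character, what B's esc chain computes
lemma pv_escaped_eq (key : String) :
    (pvCharMapA.foldl (fun r p => PySem.Str.replace r p.1 p.2) key).toList
      = key.toList.flatMap (fun c => (pvEsc c).toList) := by
  simp only [pvCharMapA, List.foldl_cons, List.foldl_nil]
  simp only [PySem.Str.toList_replace]
  simp only [show ("/" : String).toList = ['/'] from rfl,
    show ("\\" : String).toList = ['\\'] from rfl,
    show ("." : String).toList = ['.'] from rfl,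
    show ("-" : String).toList = ['-'] from rfl,
    show ("=" : String).toList = ['='] from rfl,
    show ("@" : String).toList = ['@'] from rfl,
    show ("#" : String).toList = ['#'] from rfl,
    show ("^" : String).toList = ['^'] from rfl,
    show ("&" : String).toList = ['&'] from rfl,
    show ("*" : String).toList = ['*'] from rfl,
    show ("(" : String).toList = ['('] from rfl,
    show (")" : String).toList = [')'] from rfl,
    show ("[" : String).toList = ['['] from rfl,
    show ("]" : String).toList = [']'] from rfl,
    show ("{" : String).toList = ['{'] from rfl,
    show ("}" : String).toList = ['}'] from rfl,
    show ("|" : String).toList = ['|'] from rfl,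
    show ("?" : String).toList = ['?'] from rfl,
    show ("!" : String).toList = ['!'] from rfl,
    show ("<" : String).toList = ['<'] from rfl,
    show (">" : String).toList = ['>'] from rfl,
    show ("," : String).toList = [','] from rfl,
    show (":" : String).toList = [':'] from rfl,
    show (";" : String).toList = [';'] from rfl,
    show ("`" : String).toList = ['`'] from rfl,
    show ("~" : String).toList = ['~'] from rfl,
    show ("'" : String).toList = ['\''] from rfl,
    show ("\"" : String).toList = ['"'] from rfl]
  simp only [pv_replace_single, List.flatMap_assoc]
  congr 1
  funext c
  by_cases h0 : c = '/'
  · subst h0; decide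
  by_cases h1 : c = '\\'
  · subst h1; decide
  by_cases h2 : c = '.'
  · subst h2; decide
  by_cases h3 : c = '-'
  · subst h3; decide
  by_cases h4 : c = '='
  · subst h4; decide
  by_cases h5 : c = '@'
  · subst h5; decide
  by_cases h6 : c = '#'
  · subst h6; decide
  by_cases h7 : c = '^'
  · subst h7; decide
  by_cases h8 : c = '&'
  · subst h8; decide
  by_cases h9 : c = '*'
  · subst h9; decide
  by_cases h10 : c = '('
  · subst h10; decide
  by_cases h11 : c = ')'
  · subst h11; decide
  by_cases h12 : c = '['
  · subst h12; decide
  by_cases h13 : c = ']'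
  · subst h13; decide
  by_cases h14 : c = '{'
  · subst h14; decide
  by_cases h15 : c = '}'
  · subst h15; decide
  by_cases h16 : c = '|'
  · subst h16; decide
  by_cases h17 : c = '?'
  · subst h17; decide
  by_cases h18 : c = '!'
  · subst h18; decide
  by_cases h19 : c = '<'
  · subst h19; decide
  by_cases h20 : c = '>'
  · subst h20; decide
  by_cases h21 : c = ','
  · subst h21; decide
  by_cases h22 : c = ':'
  · subst h22; decide
  by_cases h23 : c = ';'
  · subst h23; decide
  by_cases h24 : c = '`'
  · subst h24; decide
  by_cases h25 : c = '~'
  · subst h25; decide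
  by_cases h26 : c = '\''
  · subst h26; decide
  by_cases h27 : c = '"'
  · subst h27; decide
  simp [pvSubst, pvEsc, h0, h1, h2, h3, h4, h5, h6, h7, h8, h9, h10, h11, h12, h13,
        h14, h15, h16, h17, h18, h19, h20, h21, h22, h23, h24, h25, h26, h27]

-- B's accumulator loop is map
lemma pv_escLoop_eq : ∀ (l : List Char) (parts : List String),
    pvEscLoop l parts = parts ++ l.map pvEsc := by
  intro l
  induction l with
  | nil => intro parts; simp [pvEscLoop]
  | cons c rest ih => intro parts; simp [pvEscLoop, ih]

-- ''.join is concatenation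
lemma pv_join_nilsep (parts : List (List Char)) :
    PySem.Chars.join [] parts = parts.flatten := by
  induction parts with
  | nil => rw [PySem.Chars.join_nil]; rfl
  | cons p t ih =>
    cases t with
    | nil => rw [PySem.Chars.join_singleton]; simp
    | cons q r => rw [PySem.Chars.join_cons_cons, ih]; simp

lemma pv_joinB_eq (key : String) :
    (PySem.Str.join "" (pvEscLoop key.toList [])).toList
      = key.toList.flatMap (fun c => (pvEsc c).toList) := by
  rw [PySem.Str.toList_join, pv_escLoop_eq]
  simp [pv_join_nilsep, List.flatMap]
  rfl

-- ===== VERDICT (by name: the statement is the Claim_ definition above) =====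
theorem clean_property_key_spec : Claim_equal_clean_property_key := by
  intro key _
  unfold Spec_clean_property_key clean_property_key clean_property_key_alt
  have hres : pvCharMapA.foldl (fun r p => PySem.Str.replace r p.1 p.2) key
      = PySem.Str.join "" (pvEscLoop key.toList []) := by
    apply String.ext
    rw [pv_escaped_eq, pv_joinB_eq]
  rw [hres]
  dsimp only
  generalize (PySem.Str.join "" (pvEscLoop key.toList [])) = r
  have hslice : (PySem.Str.slice r none (some 1)).toList = r.toList.take 1 := by
    rw [PySem.Str.toList_slice]
    simp [PySem.Chars.slice_eq_listSlice]
    exact_mod_cast PySem.List.slice_to_natCast r.toList 1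
  cases hcl : r.toList with
  | nil =>
    have hempty : PySem.Str.slice r none (some 1) = "" := by
      apply String.ext; rw [hslice, hcl]; rfl
    simp [hempty]
  | cons c t =>
    have hhead : (PySem.Str.slice r none (some 1)).toList = [c] := by
      rw [hslice, hcl]; rfl
    have hne : ¬ PySem.Str.slice r none (some 1) = "" := by
      intro h; rw [h] at hhead; simp at hhead
    have hlist : PySem.List.slice r.toList none (some 1) = [c] := by
      have h := hhead
      rw [PySem.Str.toList_slice, PySem.Chars.slice_eq_listSlice] at h
      exact h
    have halpha : PySem.Chars.strIsalpha (PySem.List.slice r.toList none (some 1))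
        = PySem.Chars.isalpha c := by
      rw [hlist]; simp [PySem.Chars.strIsalpha]
    by_cases ha : PySem.Chars.isalpha c = true
    · simp [ha, hne, halpha]
    · simp only [Bool.not_eq_true] at ha
      simp [ha, hne, halpha]
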